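-- pv_equiv track=rewrite | github.com/jphatbeats/CryptoMigrate | enhanced_bot_integration.py | format_intelligence_alerts
-- ===== SOURCE A (Python) =====
-- def format_intelligence_alerts(intelligence_data):
--     """Convert Railway intelligence into bot-compatible alerts"""
--     enhanced_alerts = []
--
--     # Portfolio news alerts
--     for article in intelligence_data.get('portfolio_news', []):
--         enhanced_alerts.append({
--             'type': 'portfolio_news',
--             'symbol': 'PORTFOLIO',
--             'platform': 'News',
--             'message': f"📰 {article.get('title', 'Portfolio news')[:80]}... ({article.get('source_name', 'Unknown')})"
--         })
--
--     # Risk alerts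
--     for alert in intelligence_data.get('risk_alerts', []):
--         enhanced_alerts.append({
--             'type': 'risk_alert',
--             'symbol': 'MARKET',
--             'platform': 'Risk',
--             'message': f"⚠️ {alert.get('title', 'Risk warning')[:80]}..."
--         })
--
--     # Bullish signals
--     for signal in intelligence_data.get('bullish_signals', []):
--         enhanced_alerts.append({
--             'type': 'bullish_signal',
--             'symbol': 'MARKET',
--             'platform': 'Signals',
--             'message': f"📈 {signal.get('title', 'Bullish signal')[:80]}..."
--         })
--
--     # Trading opportunities
--     for opp in intelligence_data.get('opportunities', []):
--         enhanced_alerts.append({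
--             'type': 'opportunity',
--             'symbol': 'MARKET',
--             'platform': 'Opportunities',
--             'message': f"🔍 {opp.get('title', 'Trading opportunity')[:80]}..."
--         })
--
--     # Breaking news
--     for news in intelligence_data.get('breaking_news', []):
--         enhanced_alerts.append({
--             'type': 'breaking_news',
--             'symbol': 'MARKET',
--             'platform': 'Breaking',
--             'message': f"🚨 {news.get('title', 'Breaking news')[:80]}... ({news.get('source_name', 'Unknown')})"
--         })
--
--     # Pump/dump alerts
--     for pump_dump in intelligence_data.get('pump_dump_alerts', []):
--         enhanced_alerts.append({
--             'type': 'pump_dump_alert',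
--             'symbol': 'MARKET',
--             'platform': 'PumpDump',
--             'message': f"⚡ {pump_dump.get('title', 'Pump/dump signal')[:80]}..."
--         })
--
--     return enhanced_alerts
-- ===== SOURCE B (Python) =====
-- def format_intelligence_alerts(intelligence_data):
--     """Convert Railway intelligence into bot-compatible alerts.
--
--     Recursive decomposition: recurse over a spec list of categories; each
--     recursion step emits that category's alerts by a list comprehension and
--     concatenates the recursively built tail.
--     """
--     spec = [
--         ('portfolio_news', 'portfolio_news', 'PORTFOLIO', 'News', '\U0001F4F0 ', 'Portfolio news', True),
--         ('risk_alerts', 'risk_alert', 'MARKET', 'Risk', '\u26A0\uFE0F ', 'Risk warning', False),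
--         ('bullish_signals', 'bullish_signal', 'MARKET', 'Signals', '\U0001F4C8 ', 'Bullish signal', False),
--         ('opportunities', 'opportunity', 'MARKET', 'Opportunities', '\U0001F50D ', 'Trading opportunity', False),
--         ('breaking_news', 'breaking_news', 'MARKET', 'Breaking', '\U0001F6A8 ', 'Breaking news', True),
--         ('pump_dump_alerts', 'pump_dump_alert', 'MARKET', 'PumpDump', '\u26A1 ', 'Pump/dump signal', False),
--     ]
--
--     def message(item, prefix, default, with_source):
--         base = prefix + item.get('title', default)[:80] + '...'
--         if with_source:
--             return base + ' ({})'.format(item.get('source_name', 'Unknown'))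
--         return base
--
--     def build(rows):
--         if not rows:
--             return []
--         key, typ, symbol, platform, prefix, default, with_source = rows[0]
--         return [
--             {'type': typ, 'symbol': symbol, 'platform': platform,
--              'message': message(item, prefix, default, with_source)}
--             for item in intelligence_data.get(key, [])
--         ] + build(rows[1:])
--
--     return build(spec)
-- ===== Notes on version B (the rewrite author's own statement) =====
-- stated objective: simpler
-- what changed: Replaces A's six unrolled accumulator-append loops by a recursion over a spec list of categories, each step emitting that category's alerts with a list comprehension (message built by a shared helper) and concatenating the recursively built tail.
import Mathlib
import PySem

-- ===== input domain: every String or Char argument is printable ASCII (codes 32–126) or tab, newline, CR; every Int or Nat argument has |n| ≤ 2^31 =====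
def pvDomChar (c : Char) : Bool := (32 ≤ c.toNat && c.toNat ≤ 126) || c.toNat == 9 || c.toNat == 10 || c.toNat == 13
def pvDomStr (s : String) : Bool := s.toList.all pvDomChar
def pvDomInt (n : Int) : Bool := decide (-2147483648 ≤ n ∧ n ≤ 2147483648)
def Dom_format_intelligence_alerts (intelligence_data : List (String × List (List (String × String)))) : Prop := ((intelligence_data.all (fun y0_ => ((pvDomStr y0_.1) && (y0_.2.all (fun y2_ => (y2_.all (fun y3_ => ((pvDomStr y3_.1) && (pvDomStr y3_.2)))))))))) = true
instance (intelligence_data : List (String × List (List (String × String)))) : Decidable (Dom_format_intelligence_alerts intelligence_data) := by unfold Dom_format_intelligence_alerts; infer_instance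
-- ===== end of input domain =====

-- B rebuilds the alert list by recursion over a category-spec list with per-category
-- comprehension + concatenation, instead of A's six unrolled accumulator loops (simpler, same cost).

-- dict.get(k, default) on an association list (first match), the dict primitive both ports use
def pvDictGet {α : Type} (l : List (String × α)) (k : String) (dflt : α) : α :=
  match l.find? (fun p => p.1 == k) with
  | some p => p.2
  | none => dflt

-- ===== PORT A =====
def format_intelligence_alerts (intelligence_data : List (String × List (List (String × String)))) : List (List (String × String)) :=
  let enhanced_alerts : List (List (String × String)) := []
  -- Portfolio news alerts
  let enhanced_alerts := (pvDictGet intelligence_data "portfolio_news" []).foldl (fun acc article =>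
    acc ++ [[("type", "portfolio_news"), ("symbol", "PORTFOLIO"), ("platform", "News"),
      ("message", "📰 " ++ PySem.Str.slice (pvDictGet article "title" "Portfolio news") none (some 80) ++ "... (" ++ pvDictGet article "source_name" "Unknown" ++ ")")]]) enhanced_alerts
  -- Risk alerts
  let enhanced_alerts := (pvDictGet intelligence_data "risk_alerts" []).foldl (fun acc alert =>
    acc ++ [[("type", "risk_alert"), ("symbol", "MARKET"), ("platform", "Risk"),
      ("message", "⚠️ " ++ PySem.Str.slice (pvDictGet alert "title" "Risk warning") none (some 80) ++ "...")]]) enhanced_alerts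
  -- Bullish signals
  let enhanced_alerts := (pvDictGet intelligence_data "bullish_signals" []).foldl (fun acc signal =>
    acc ++ [[("type", "bullish_signal"), ("symbol", "MARKET"), ("platform", "Signals"),
      ("message", "📈 " ++ PySem.Str.slice (pvDictGet signal "title" "Bullish signal") none (some 80) ++ "...")]]) enhanced_alerts
  -- Trading opportunities
  let enhanced_alerts := (pvDictGet intelligence_data "opportunities" []).foldl (fun acc opp =>
    acc ++ [[("type", "opportunity"), ("symbol", "MARKET"), ("platform", "Opportunities"),
      ("message", "🔍 " ++ PySem.Str.slice (pvDictGet opp "title" "Trading opportunity") none (some 80) ++ "...")]]) enhanced_alerts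
  -- Breaking news
  let enhanced_alerts := (pvDictGet intelligence_data "breaking_news" []).foldl (fun acc news =>
    acc ++ [[("type", "breaking_news"), ("symbol", "MARKET"), ("platform", "Breaking"),
      ("message", "🚨 " ++ PySem.Str.slice (pvDictGet news "title" "Breaking news") none (some 80) ++ "... (" ++ pvDictGet news "source_name" "Unknown" ++ ")")]]) enhanced_alerts
  -- Pump/dump alerts
  let enhanced_alerts := (pvDictGet intelligence_data "pump_dump_alerts" []).foldl (fun acc pump_dump =>
    acc ++ [[("type", "pump_dump_alert"), ("symbol", "MARKET"), ("platform", "PumpDump"),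
      ("message", "⚡ " ++ PySem.Str.slice (pvDictGet pump_dump "title" "Pump/dump signal") none (some 80) ++ "...")]]) enhanced_alerts
  enhanced_alerts

-- ===== PORT B =====
-- Source B's message helper
def pvMessage (item : List (String × String)) (pfx dflt : String) (withSource : Bool) : String :=
  let base := pfx ++ PySem.Str.slice (pvDictGet item "title" dflt) none (some 80) ++ "..."
  if withSource then base ++ " (" ++ pvDictGet item "source_name" "Unknown" ++ ")"
  else base

-- Source B's recursive build over the remaining spec rows
def pvBuild (intelligence_data : List (String × List (List (String × String)))) :
    List (String × String × String × String × String × String × Bool) → List (List (String × String))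
  | [] => []
  | (key, typ, symbol, platform, pfx, dflt, withSource) :: rest =>
      ((pvDictGet intelligence_data key []).map (fun item =>
        [("type", typ), ("symbol", symbol), ("platform", platform),
         ("message", pvMessage item pfx dflt withSource)]))
      ++ pvBuild intelligence_data rest

def format_intelligence_alerts_alt (intelligence_data : List (String × List (List (String × String)))) : List (List (String × String)) :=
  pvBuild intelligence_data
    [("portfolio_news", "portfolio_news", "PORTFOLIO", "News", "📰 ", "Portfolio news", true),
     ("risk_alerts", "risk_alert", "MARKET", "Risk", "⚠️ ", "Risk warning", false),
     ("bullish_signals", "bullish_signal", "MARKET", "Signals", "📈 ", "Bullish signal", false),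
     ("opportunities", "opportunity", "MARKET", "Opportunities", "🔍 ", "Trading opportunity", false),
     ("breaking_news", "breaking_news", "MARKET", "Breaking", "🚨 ", "Breaking news", true),
     ("pump_dump_alerts", "pump_dump_alert", "MARKET", "PumpDump", "⚡ ", "Pump/dump signal", false)]

-- ===== PRECONDITION & SPEC =====
def Spec_format_intelligence_alerts (intelligence_data : List (String × List (List (String × String)))) (out : List (List (String × String))) : Prop := out = format_intelligence_alerts_alt intelligence_data
instance (intelligence_data : List (String × List (List (String × String)))) (out : List (List (String × String))) : Decidable (Spec_format_intelligence_alerts intelligence_data out) := by unfold Spec_format_intelligence_alerts; infer_instance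

-- ===== CLAIM =====
def Claim_equal_format_intelligence_alerts : Prop := ∀ (intelligence_data : List (String × List (List (String × String)))), Dom_format_intelligence_alerts intelligence_data → Spec_format_intelligence_alerts intelligence_data (format_intelligence_alerts intelligence_data)

-- ===== LEMMAS AND PROOFS =====

-- A's append-one loop equals the map of the same list
theorem pv_foldl_push {α β : Type} (f : α → β) :
    ∀ (l : List α) (acc : List β), l.foldl (fun a x => a ++ [f x]) acc = acc ++ l.map f := by
  intro l
  induction l with
  | nil => intro acc; simp
  | cons x xs ih => intro acc; simp [List.foldl, ih]

-- "..." followed by " (src)" is "... (src)"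
theorem pv_msg_assoc (p t s : String) :
    p ++ t ++ "... (" ++ s ++ ")" = p ++ t ++ "..." ++ " (" ++ s ++ ")" := by
  have h : ("..." : String) ++ " (" = "... (" := rfl
  rw [← h]
  simp [String.append_assoc]

-- ===== VERDICT =====
set_option maxHeartbeats 1000000 in
theorem format_intelligence_alerts_spec : Claim_equal_format_intelligence_alerts := by
  intro d _
  show format_intelligence_alerts d = format_intelligence_alerts_alt d
  simp only [format_intelligence_alerts, format_intelligence_alerts_alt, pvBuild, pvMessage]
  simp only [pv_foldl_push, pv_msg_assoc]
  simp [List.append_assoc]
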